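-- pv_equiv track=rewrite | github.com/Misterpetchz/Object-Oriented | lab3/3.py | is_plusone_dictionary
-- ===== SOURCE A (Python) =====
-- def is_plusone_dictionary(d):
--     list = []
--     for key, value in d.items():
--         list.append(key)
--         list.append(value)
--     for i in range(1, len(list)):
--         if list[i] != list[i - 1] + 1:
--             return False
--     return True
-- ===== SOURCE B (Python) =====
-- def is_plusone_dictionary(d):
--     prev = None
--     first = True
--     for key, value in d.items():
--         if not first and key != prev + 1:
--             return False
--         if value != key + 1:
--             return False
--         prev = value
--         first = False
--     return True
-- ===== Notes on version B (the rewrite author's own statement) =====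
-- stated objective: simpler
-- what changed: B drops A's intermediate flattened list and its second index loop, checking each (key, value) pair in one pass with a running prev value and a first flag.
import Mathlib
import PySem

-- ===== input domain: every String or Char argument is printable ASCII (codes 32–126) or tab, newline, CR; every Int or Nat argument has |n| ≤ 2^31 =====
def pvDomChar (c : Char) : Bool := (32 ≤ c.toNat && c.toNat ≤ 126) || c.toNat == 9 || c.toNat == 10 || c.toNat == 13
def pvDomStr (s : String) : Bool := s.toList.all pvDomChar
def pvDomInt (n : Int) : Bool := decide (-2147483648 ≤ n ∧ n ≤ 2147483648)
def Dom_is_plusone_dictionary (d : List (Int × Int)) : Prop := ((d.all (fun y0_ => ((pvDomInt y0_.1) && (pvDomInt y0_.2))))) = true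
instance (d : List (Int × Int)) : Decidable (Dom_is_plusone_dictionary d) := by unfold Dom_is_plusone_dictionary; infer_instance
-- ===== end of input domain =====

-- B replaces A's intermediate flattened list + index loop with one pass over the items
-- keeping a running prev value (objective: simpler).

-- ===== PORT A =====
-- 'for i in range(1, len(list)): if list[i] != list[i-1] + 1: return False' as the obvious
-- structural recursion over adjacent elements of the built list.
def pvCheckAdj : List Int → Bool
  | [] => true
  | [_] => true
  | a :: b :: t => if b ≠ a + 1 then false else pvCheckAdj (b :: t)

def is_plusone_dictionary (d : List (Int × Int)) : Bool :=
  -- list = []; for key, value in d.items(): list.append(key); list.append(value)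
  let lst := (PySem.Dict.ofList d).items.foldl (fun acc kv => acc ++ [kv.1, kv.2]) []
  pvCheckAdj lst

-- ===== PORT B =====
-- prev = None / first = True folded into one Option Int state; the two early returns of the
-- Python loop body are the two && conjuncts.
def pvLoopB : Option Int → List (Int × Int) → Bool
  | _, [] => true
  | none, (k, v) :: t =>
    if v ≠ k + 1 then false
    else pvLoopB (some v) t
  | some p, (k, v) :: t =>
    if k ≠ p + 1 then false
    else if v ≠ k + 1 then false
    else pvLoopB (some v) t

def is_plusone_dictionary_alt (d : List (Int × Int)) : Bool :=
  pvLoopB none (PySem.Dict.ofList d).items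

-- ===== PRECONDITION & SPEC =====
def Spec_is_plusone_dictionary (d : List (Int × Int)) (out : Bool) : Prop := out = is_plusone_dictionary_alt d
instance (d : List (Int × Int)) (out : Bool) : Decidable (Spec_is_plusone_dictionary d out) := by unfold Spec_is_plusone_dictionary; infer_instance

-- ===== CLAIM (what is proved, stated in full; the proofs are below) =====
def Claim_equal_is_plusone_dictionary : Prop := ∀ (d : List (Int × Int)), Dom_is_plusone_dictionary d → Spec_is_plusone_dictionary d (is_plusone_dictionary d)

-- ===== LEMMAS AND PROOFS =====
-- A's flattened list, in flatMap form.
theorem pvFlat_eq (l : List (Int × Int)) :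
    l.foldl (fun acc kv => acc ++ [kv.1, kv.2]) [] = l.flatMap (fun kv => [kv.1, kv.2]) := by
  simpa using PySem.List.foldl_append_eq_flatMap (g := fun kv : Int × Int => [kv.1, kv.2]) (l := l) (acc := [])

theorem pvAdj_loop_some (p : Int) (l : List (Int × Int)) :
    pvCheckAdj (p :: l.flatMap (fun kv => [kv.1, kv.2])) = pvLoopB (some p) l := by
  induction l generalizing p with
  | nil => rfl
  | cons kv t ih =>
    obtain ⟨k, v⟩ := kv
    simp only [List.flatMap_cons, pvCheckAdj, pvLoopB, List.cons_append]
    by_cases h1 : k ≠ p + 1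
    · simp [h1]
    · simp only [h1, if_false]
      by_cases h2 : v ≠ k + 1
      · simp [h2]
      · simpa [h2] using ih v

theorem pvAdj_loop (l : List (Int × Int)) :
    pvCheckAdj (l.flatMap (fun kv => [kv.1, kv.2])) = pvLoopB none l := by
  cases l with
  | nil => rfl
  | cons kv t =>
    obtain ⟨k, v⟩ := kv
    simp only [List.flatMap_cons, pvCheckAdj, pvLoopB, List.cons_append]
    by_cases h2 : v ≠ k + 1
    · simp [h2]
    · simpa [h2] using pvAdj_loop_some v t

-- ===== VERDICT (by name: the statement is the Claim_ definition above) =====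
theorem is_plusone_dictionary_spec : Claim_equal_is_plusone_dictionary := by
  intro d _
  unfold Spec_is_plusone_dictionary is_plusone_dictionary is_plusone_dictionary_alt
  rw [pvFlat_eq, pvAdj_loop]
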